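-- pv_equiv track=rewrite | github.com/HwayoungYoon/Coding-Test-Practice | 프로그래머스/lv2/42626. 더 맵게/더 맵게.py | solution
-- ===== SOURCE A (Python) =====
-- import heapq
--
-- def solution(scoville, K):
--     heapq.heapify(scoville)
--     num = 0
--     while scoville[0] < K:
--         if len(scoville) == 1:
--             return -1
--         elif len(scoville) > 1:
--             x1 = heapq.heappop(scoville)
--             x2 = heapq.heappop(scoville)
--             heapq.heappush(scoville, x1+x2*2)
--             num += 1
--     return num
-- ===== SOURCE B (Python) =====
-- def solution(scoville, K):
--     # Two-source merge instead of a heap: the input is sorted once and consumed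
--     # front-to-back by an index; newly produced mixes go into a separate bag
--     # whose minimum is found by a linear scan. Return value only (A mutates
--     # scoville in place; B does not).
--     base = sorted(scoville)
--     i = 0
--     mixes = []
--     num = 0
--
--     def take():
--         nonlocal i
--         if i < len(base) and (not mixes or base[i] <= min(mixes)):
--             v = base[i]
--             i += 1
--         else:
--             v = min(mixes)
--             mixes.remove(v)
--         return v
--
--     while True:
--         x1 = take()
--         if x1 >= K:
--             return num
--         if i == len(base) and not mixes:
--             return -1
--         x2 = take()
--         mixes.append(x1 + 2 * x2)
--         num += 1
-- ===== Notes on version B (the rewrite author's own statement) =====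
-- stated objective: alternative
-- what changed: Replaces the single min-heap with a two-source merge: the input is sorted once and consumed front-to-back by an index, while newly produced mixes go into a separate unordered bag whose minimum is found by a linear scan; no ordered container is ever updated after the initial sort.
import Mathlib
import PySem

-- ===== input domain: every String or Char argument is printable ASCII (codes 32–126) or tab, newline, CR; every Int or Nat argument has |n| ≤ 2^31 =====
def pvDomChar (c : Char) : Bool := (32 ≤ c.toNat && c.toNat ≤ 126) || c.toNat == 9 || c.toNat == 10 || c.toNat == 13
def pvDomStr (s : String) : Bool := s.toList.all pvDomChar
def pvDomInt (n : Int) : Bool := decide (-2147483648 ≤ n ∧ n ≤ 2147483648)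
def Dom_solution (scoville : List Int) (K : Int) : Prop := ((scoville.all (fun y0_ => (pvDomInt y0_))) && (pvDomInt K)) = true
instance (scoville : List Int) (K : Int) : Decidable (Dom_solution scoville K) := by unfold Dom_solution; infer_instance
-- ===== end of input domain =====

-- B replaces A's single min-heap by a two-source merge: the input sorted once and consumed
-- front-to-back, plus a separate bag of produced mixes whose minimum is found by a linear scan;
-- equivalence is about the RETURN value only (A mutates the argument list in place, B does not).

-- ===== PORT A =====
-- A's heapq heap is ported at the library's interface: heapFix restores "first minimal
-- element at the root" (heapify / the state after heappush), heappop = take the root of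
-- heapFix; the residual layout of Python's array heap is not observable in the result.
def heapFix (l : List Int) : List Int :=
  match PySem.List.min? l (fun x => x) with
  | none => []
  | some m => m :: l.erase m

theorem heapFix_perm (l : List Int) : (heapFix l).Perm l := by
  unfold heapFix
  rcases h : PySem.List.min? l (fun x => x) with _ | m
  · simp [(PySem.List.min?_eq_none_iff l _).mp h]
  · exact (List.perm_cons_erase (PySem.List.min?_mem h)).symm

theorem heapFix_length (l : List Int) : (heapFix l).length = l.length :=
  (heapFix_perm l).length_eq

-- heappop: root and remainder of the re-fixed heap
def heapPop (l : List Int) : Int × List Int :=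
  ((heapFix l).headI, (heapFix l).tail)

-- the while loop of A: pop the two smallest, push the mix, count
def loopA : List Int → Int → Int → Int
  | [], _, _ => 0                    -- unreachable: Python raises IndexError on the empty heap
  | a :: t, K, num =>
    if a < K then
      if _h : t = [] then -1         -- len(scoville) == 1
      else
        let p := heapPop t
        loopA (heapFix (p.2 ++ [a + p.1 * 2])) K (num + 1)
    else num
  termination_by l _ _ => l.length
  decreasing_by
    simp [heapFix_length, heapPop]
    have : t.length ≠ 0 := fun hz => _h (List.eq_nil_of_length_eq_zero hz)
    omega

def solution (scoville : List Int) (K : Int) : Int :=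
  loopA (heapFix scoville) K 0

-- ===== PORT B =====
-- B's take(): next value comes from the front of the sorted base (index i = remaining
-- suffix `rest`) or, if smaller, the minimum of the mix bag found by scan (min + remove)
def takeB : List Int → List Int → Int × List Int × List Int
  | a :: t, mixes =>
    match PySem.List.min? mixes (fun x => x) with
    | none => (a, t, mixes)                                 -- bag empty: take from the base
    | some m => if a ≤ m then (a, t, mixes) else (m, a :: t, mixes.erase m)
  | [], mixes =>
    match PySem.List.min? mixes (fun x => x) with
    | some m => (m, [], mixes.erase m)
    | none => (0, [], [])              -- unreachable in B: Python's min([]) raises ValueError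

theorem takeB_perm (rest mixes : List Int) (h : rest ++ mixes ≠ []) :
    ((takeB rest mixes).1 :: ((takeB rest mixes).2.1 ++ (takeB rest mixes).2.2)).Perm
      (rest ++ mixes) := by
  cases rest with
  | nil =>
    rcases hm : PySem.List.min? mixes (fun x => x) with _ | m
    · exact absurd (by simp [(PySem.List.min?_eq_none_iff mixes _).mp hm]) h
    · simpa [takeB, hm] using (List.perm_cons_erase (PySem.List.min?_mem hm)).symm
  | cons a t =>
    rcases hm : PySem.List.min? mixes (fun x => x) with _ | m
    · have h0 : mixes = [] := (PySem.List.min?_eq_none_iff mixes _).mp hm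
      subst h0
      simp [takeB, PySem.List.min?]
    · by_cases hle : a ≤ m
      · simp [takeB, hm, hle]
      · have hmm : mixes.Perm (m :: mixes.erase m) := List.perm_cons_erase (PySem.List.min?_mem hm)
        have : ((a :: t) ++ mixes).Perm ((a :: t) ++ (m :: mixes.erase m)) :=
          List.Perm.append_left _ hmm
        have h2 : ((a :: t) ++ (m :: mixes.erase m)).Perm (m :: ((a :: t) ++ mixes.erase m)) :=
          List.perm_middle
        simpa [takeB, hm, hle] using (this.trans h2).symm

-- the sorted head is ≤ everything in the list
-- the while loop of B over (remaining sorted suffix, mix bag)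
def loopB (rest mixes : List Int) (K num : Int) : Int :=
  let p := takeB rest mixes
  if p.1 < K then
    if h : p.2.1 = [] ∧ p.2.2 = [] then -1
    else
      let q := takeB p.2.1 p.2.2
      loopB q.2.1 (q.2.2 ++ [p.1 + 2 * q.1]) K (num + 1)
  else num
  termination_by rest.length + mixes.length
  decreasing_by
    have hne : rest ++ mixes ≠ [] := by
      intro hz
      rcases List.append_eq_nil_iff.mp hz with ⟨h1, h2⟩
      subst h1; subst h2
      exact h ⟨rfl, rfl⟩
    have h1 := (takeB_perm rest mixes hne).length_eq
    have hne2 : (takeB rest mixes).2.1 ++ (takeB rest mixes).2.2 ≠ [] := by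
      intro hz
      exact h (List.append_eq_nil_iff.mp hz)
    have h2 := (takeB_perm _ _ hne2).length_eq
    simp at h1 h2 ⊢
    omega

def solution_alt (scoville : List Int) (K : Int) : Int :=
  loopB (PySem.List.sorted scoville (fun x => x) false) [] K 0

-- ===== PRECONDITION & SPEC =====
-- Pre_ excludes only the empty list, on which A raises IndexError (scoville[0]).
def Pre_solution (scoville : List Int) (K : Int) : Prop := scoville ≠ []
instance (scoville : List Int) (K : Int) : Decidable (Pre_solution scoville K) := by unfold Pre_solution; infer_instance
def pvWitness_solution : List Int × Int := ([1, 2, 3, 9, 10, 12], 7)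

def Spec_solution (scoville : List Int) (K : Int) (out : Int) : Prop := out = solution_alt scoville K
instance (scoville : List Int) (K : Int) (out : Int) : Decidable (Spec_solution scoville K out) := by unfold Spec_solution; infer_instance

-- ===== CLAIM (what is proved, stated in full; the proofs are below) =====
def Claim_equal_solution : Prop := ∀ (scoville : List Int) (K : Int), Dom_solution scoville K → Pre_solution scoville K → Spec_solution scoville K (solution scoville K)

-- ===== LEMMAS AND PROOFS =====

theorem sorted_head_min {b : Int} {u : List Int}
    (hs : (b :: u).Pairwise (· ≤ ·)) : ∀ x ∈ b :: u, b ≤ x := by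
  intro x hx
  rcases List.mem_cons.mp hx with rfl | hx
  · exact le_refl x
  · exact (List.pairwise_cons.mp hs).1 x hx

theorem takeB_min (rest mixes : List Int) (hs : rest.Pairwise (· ≤ ·)) :
    ∀ x ∈ rest ++ mixes, (takeB rest mixes).1 ≤ x := by
  intro x hx
  cases rest with
  | nil =>
    rcases hm : PySem.List.min? mixes (fun x => x) with _ | m
    · simp [(PySem.List.min?_eq_none_iff mixes _).mp hm] at hx
    · simpa [takeB, hm] using PySem.List.min?_isMin hm x (by simpa using hx)
  | cons a t =>
    rcases hm : PySem.List.min? mixes (fun x => x) with _ | m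
    · have : mixes = [] := (PySem.List.min?_eq_none_iff mixes _).mp hm
      subst this
      simpa [takeB, hm] using sorted_head_min hs x (by simpa using hx)
    · by_cases hle : a ≤ m
      · simp only [takeB, hm, if_pos hle]
        rcases List.mem_append.mp hx with hx | hx
        · exact sorted_head_min hs x hx
        · exact le_trans hle (PySem.List.min?_isMin hm x hx)
      · simp only [takeB, hm, if_neg hle]
        rcases List.mem_append.mp hx with hx | hx
        · exact le_trans (le_of_not_ge hle) (sorted_head_min hs x hx)
        · exact PySem.List.min?_isMin hm x hx

theorem takeB_sorted (rest mixes : List Int) (hs : rest.Pairwise (· ≤ ·)) :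
    (takeB rest mixes).2.1.Pairwise (· ≤ ·) := by
  cases rest with
  | nil =>
    rcases hm : PySem.List.min? mixes (fun x => x) with _ | m <;> simp [takeB, hm]
  | cons a t =>
    rcases hm : PySem.List.min? mixes (fun x => x) with _ | m
    · simpa [takeB, hm] using (List.pairwise_cons.mp hs).2
    · by_cases hle : a ≤ m
      · simpa [takeB, hm, hle] using (List.pairwise_cons.mp hs).2
      · simpa [takeB, hm, hle] using hs


theorem heapFix_head_min {l : List Int} {m : Int} {r : List Int}
    (h : heapFix l = m :: r) : ∀ x ∈ m :: r, m ≤ x := by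
  unfold heapFix at h
  rcases hm : PySem.List.min? l (fun x => x) with _ | m'
  · simp [hm] at h
  · rw [hm] at h
    cases h
    intro x hx
    rcases List.mem_cons.mp hx with rfl | hx
    · exact le_refl x
    · exact PySem.List.min?_isMin hm x (List.mem_of_mem_erase hx)

theorem heapFix_ne_nil {l : List Int} (h : l ≠ []) : heapFix l ≠ [] := by
  intro hz
  have := heapFix_length l
  rw [hz] at this
  exact h (List.eq_nil_of_length_eq_zero this.symm)

-- core invariant: A's heap (first minimal element at the head) and B's two sources
-- (sorted suffix + mix bag) hold the same multiset, so both extract the same minimum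
-- at every step and the counters agree
theorem loop_eq (n : Nat) : ∀ (l rest mixes : List Int) (K num : Int),
    l.length ≤ n → l ≠ [] → l.Perm (rest ++ mixes) → rest.Pairwise (· ≤ ·) →
    (∀ x ∈ l, l.headI ≤ x) →
    loopA l K num = loopB rest mixes K num := by
  induction n with
  | zero =>
    intro l _ _ _ _ hn hne _ _ _
    exact absurd (List.eq_nil_of_length_eq_zero (Nat.le_zero.mp hn)) hne
  | succ n ih =>
    intro l rest mixes K num hn hne hp hsort hmin
    cases l with
    | nil => exact absurd rfl hne
    | cons a t =>
      have hpoolne : rest ++ mixes ≠ [] := fun hz => by simp [hz] at hp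
      have hq := takeB_perm rest mixes hpoolne
      -- the value B takes first equals A's heap root a
      have hx1 : (takeB rest mixes).1 = a := by
        have h1 : a ≤ (takeB rest mixes).1 :=
          hmin _ (hp.symm.subset (hq.subset List.mem_cons_self))
        have h2 : (takeB rest mixes).1 ≤ a :=
          takeB_min rest mixes hsort a (hp.subset List.mem_cons_self)
        exact le_antisymm h2 h1
      have hpool' : t.Perm ((takeB rest mixes).2.1 ++ (takeB rest mixes).2.2) := by
        have := hp.trans hq.symm
        rw [hx1] at this
        exact this.cons_inv
      by_cases hK : a < K
      · by_cases ht : t = []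
        · subst ht
          have hboth : (takeB rest mixes).2.1 = [] ∧ (takeB rest mixes).2.2 = [] :=
            List.append_eq_nil_iff.mp hpool'.symm.eq_nil
          rw [loopA, if_pos hK, dif_pos rfl, loopB]
          simp [hx1, hK, hboth]
        · have hboth : ¬ ((takeB rest mixes).2.1 = [] ∧ (takeB rest mixes).2.2 = []) := by
            intro hz
            exact ht (by simpa [hz.1, hz.2] using hpool')
          have hpool'ne : (takeB rest mixes).2.1 ++ (takeB rest mixes).2.2 ≠ [] :=
            fun hz => hboth (List.append_eq_nil_iff.mp hz)
          have hq2 := takeB_perm _ _ hpool'ne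
          rcases hfix : heapFix t with _ | ⟨x2, restA⟩
          · exact absurd hfix (heapFix_ne_nil ht)
          · have hperm_fix : (x2 :: restA).Perm t := hfix ▸ heapFix_perm t
            -- the second extracted values agree
            have hx2 : (takeB (takeB rest mixes).2.1 (takeB rest mixes).2.2).1 = x2 := by
              have h1 : x2 ≤ _ :=
                heapFix_head_min hfix _
                  (hperm_fix.mem_iff.mpr (hpool'.symm.subset (hq2.subset List.mem_cons_self)))
              have h2 : _ ≤ x2 :=
                takeB_min _ _ (takeB_sorted rest mixes hsort) x2
                  (hpool'.subset (hperm_fix.subset List.mem_cons_self))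
              exact le_antisymm h2 h1
            -- residual pools are permutations
            have hrest : restA.Perm
                ((takeB (takeB rest mixes).2.1 (takeB rest mixes).2.2).2.1 ++
                 (takeB (takeB rest mixes).2.1 (takeB rest mixes).2.2).2.2) := by
              have h3 := hperm_fix.trans (hpool'.trans hq2.symm)
              rw [hx2] at h3
              exact h3.cons_inv
            have hmix : a + x2 * 2 =
                (takeB rest mixes).1 +
                  2 * (takeB (takeB rest mixes).2.1 (takeB rest mixes).2.2).1 := by
              rw [hx1, hx2]; ring
            have hperm_next :
                (heapFix (restA ++ [a + x2 * 2])).Perm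
                  ((takeB (takeB rest mixes).2.1 (takeB rest mixes).2.2).2.1 ++
                   ((takeB (takeB rest mixes).2.1 (takeB rest mixes).2.2).2.2 ++
                    [(takeB rest mixes).1 +
                     2 * (takeB (takeB rest mixes).2.1 (takeB rest mixes).2.2).1])) := by
              refine (heapFix_perm _).trans ?_
              rw [← hmix, ← List.append_assoc]
              exact hrest.append_right _
            have hlen : (heapFix (restA ++ [a + x2 * 2])).length ≤ n := by
              have h1 := heapFix_length (restA ++ [a + x2 * 2])
              have h2 := hperm_fix.length_eq
              simp at hn h1 h2 ⊢
              omega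
            have hne' : heapFix (restA ++ [a + x2 * 2]) ≠ [] := by
              intro hz
              have := heapFix_length (restA ++ [a + x2 * 2])
              simp [hz] at this
            have hrec := ih (heapFix (restA ++ [a + x2 * 2])) _ _ K (num + 1)
              hlen hne' hperm_next
              (takeB_sorted _ _ (takeB_sorted rest mixes hsort))
              (by
                rcases hfix2 : heapFix (restA ++ [a + x2 * 2]) with _ | ⟨m, r⟩
                · simp
                · intro x hx
                  simpa using heapFix_head_min hfix2 x (by simpa [hfix2] using hx))
            calc loopA (a :: t) K num
                = loopA (heapFix (restA ++ [a + x2 * 2])) K (num + 1) := by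
                  simp [loopA, hK, ht, heapPop, hfix]
              _ = loopB _ _ K (num + 1) := hrec
              _ = loopB rest mixes K num := by
                  conv_rhs => rw [loopB]
                  simp only [hx1]
                  rw [if_pos hK, dif_neg hboth]
      · conv_rhs => rw [loopB]
        simp only [hx1]
        rw [if_neg hK]
        simp [loopA, hK]

-- ===== VERDICT (by name: the statement is the Claim_ definition above) =====
theorem solution_spec : Claim_equal_solution := by
  intro scoville K _ hpre
  unfold Spec_solution solution solution_alt
  refine loop_eq scoville.length (heapFix scoville)
      (PySem.List.sorted scoville (fun x => x) false) [] K 0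
    (le_of_eq (heapFix_length scoville)) (heapFix_ne_nil hpre) ?_ ?_ ?_
  · simpa using (heapFix_perm scoville).trans (PySem.List.sorted_perm _ _ _).symm
  · simpa using PySem.List.sorted_pairwise (xs := scoville) (key := fun x => x)
  · rcases hfix : heapFix scoville with _ | ⟨m, r⟩
    · simp
    · intro x hx
      simpa using heapFix_head_min hfix x (by simpa [hfix] using hx)
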